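-- pv_equiv track=rewrite | github.com/surilp/data-structure-algorithm | graph/company_org_struc.py | _bfs
-- ===== SOURCE A (Python) =====
-- from collections import deque
--
-- def _bfs(adj_list, result, emp):
--     queue = deque()
--     for subor in adj_list[emp]:
--         queue.append(subor)
--     while queue:
--         current = queue.popleft()
--         result.append(current)
--         for subor in adj_list[current]:
--             queue.append(subor)
--     return result
-- ===== SOURCE B (Python) =====
-- def _bfs(adj_list, result, emp):
--     # Phase 1: collect the successive BFS frontiers (levels) without touching result.
--     levels = []
--     frontier = list(adj_list[emp])
--     while frontier:
--         levels.append(frontier)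
--         frontier = [child for node in frontier for child in adj_list[node]]
--     # Phase 2: the BFS pop order is exactly the concatenation of the levels.
--     for level in levels:
--         result.extend(level)
--     return result
-- ===== Notes on version B (the rewrite author's own statement) =====
-- stated objective: alternative
-- what changed: Replaced the deque pop/push loop with a two-phase algorithm: first collect the successive BFS frontier lists (levels) via repeated flat-map, then extend result with their concatenation.
import Mathlib
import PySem

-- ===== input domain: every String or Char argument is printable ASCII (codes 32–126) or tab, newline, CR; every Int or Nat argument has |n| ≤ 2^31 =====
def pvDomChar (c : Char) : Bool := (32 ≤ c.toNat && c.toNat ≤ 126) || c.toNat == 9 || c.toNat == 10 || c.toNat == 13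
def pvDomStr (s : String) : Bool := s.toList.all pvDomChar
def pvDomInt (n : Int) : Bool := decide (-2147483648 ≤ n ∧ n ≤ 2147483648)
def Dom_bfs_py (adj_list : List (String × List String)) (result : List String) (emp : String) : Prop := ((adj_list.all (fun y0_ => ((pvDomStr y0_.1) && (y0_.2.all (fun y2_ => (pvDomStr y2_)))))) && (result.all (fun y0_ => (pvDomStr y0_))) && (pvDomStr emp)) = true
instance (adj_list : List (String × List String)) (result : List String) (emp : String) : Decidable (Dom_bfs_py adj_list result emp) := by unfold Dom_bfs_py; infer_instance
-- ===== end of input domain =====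

-- B replaces A's deque pop/push loop by a two-phase algorithm (collect the BFS frontier lists,
-- then extend result with their concatenation); same append order, same KeyError/divergence
-- domain; equivalence is about the RETURN value (both Pythons also append the same elements to
-- `result` in place).  Objective: alternative decomposition.

-- adj_list[v]: Python dict lookup (dict built from the pairs, later duplicate keys overwrite).
-- A KeyError (missing key) is excluded by Pre_bfs_py; there the `.getD []` branch is never taken.
def pvCh (adj_list : List (String × List String)) (v : String) : List String :=
  ((PySem.Dict.ofList adj_list).get? v).getD []

-- fuel: an upper bound on the number of queue pops A performs on any input where it terminates
-- (weight w(v) = 1 + Σ w(children), cut off at depth adj_list.length + 1; on the acyclic,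
-- key-closed inputs of Pre_bfs_py this is the exact total number of enqueues).
def pvWt (adj_list : List (String × List String)) : Nat → String → Nat
  | 0, _ => 1
  | n + 1, v => 1 + ((pvCh adj_list v).map (pvWt adj_list n)).sum

def pvFuel (adj_list : List (String × List String)) (emp : String) : Nat :=
  ((pvCh adj_list emp).map (pvWt adj_list (adj_list.length + 1))).sum

-- ===== PORT A =====
-- A's while-loop: pop the queue front, append it to result, push its children at the back.
-- The fuel argument is only a totality guard; Pre_bfs_py inputs never exhaust it.
def pvQrun (adj_list : List (String × List String)) : Nat → List String → List String → List String
  | _, [], res => res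
  | 0, _ :: _, res => res
  | n + 1, x :: rest, res => pvQrun adj_list n (rest ++ pvCh adj_list x) (res ++ [x])

def bfs_py (adj_list : List (String × List String)) (result : List String) (emp : String) : List String :=
  pvQrun adj_list (pvFuel adj_list emp) (pvCh adj_list emp) result

-- ===== PORT B =====
-- B's phase 1: the list of successive nonempty frontiers, each obtained from the previous one by
-- flat-mapping adj_list lookup.  Same fuel guard as port A (one fuel unit per collected node:
-- a frontier longer than the remaining fuel is truncated, and fuel 0 stops the recursion).
def pvLevels (adj_list : List (String × List String)) : Nat → List String → List (List String)
  | _, [] => []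
  | 0, _ :: _ => []
  | n + 1, x :: f => (x :: f).take (n + 1) ::
      pvLevels adj_list (n + 1 - (x :: f).length) ((x :: f).flatMap (pvCh adj_list))
  termination_by n f => n
  decreasing_by simp

-- B's phase 2: result extended with the concatenation of the levels.
def bfs_py_alt (adj_list : List (String × List String)) (result : List String) (emp : String) : List String :=
  result ++ (pvLevels adj_list (pvFuel adj_list emp) (pvCh adj_list emp)).flatten

-- ===== PRECONDITION & SPEC =====
-- reflexive-transitive closure of the child relation from `start` (adj_list.length + 1 rounds
-- suffice: a shortest path only passes through distinct dict keys)
def pvClosure (adj_list : List (String × List String)) (start : List String) : List String :=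
  (List.range (adj_list.length + 1)).foldl
    (fun S _ => (S ++ S.flatMap (pvCh adj_list)).dedup) start

-- Exactly the inputs on which Python A returns: emp is a key, every node reachable from its
-- children is a key (else KeyError), and no reachable node lies on a cycle (else the loop never
-- terminates).  The ports are total (fuel-guarded), so the equivalence proof itself holds on all
-- inputs; Pre_ delimits where A's behaviour is the value being claimed.
def Pre_bfs_py (adj_list : List (String × List String)) (result : List String) (emp : String) : Prop :=
  (PySem.Dict.ofList adj_list).contains emp = true ∧
  ∀ v ∈ pvClosure adj_list (pvCh adj_list emp),
    (PySem.Dict.ofList adj_list).contains v = true ∧ v ∉ pvClosure adj_list (pvCh adj_list v)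

instance (adj_list : List (String × List String)) (result : List String) (emp : String) : Decidable (Pre_bfs_py adj_list result emp) := by unfold Pre_bfs_py; infer_instance

def pvWitness_bfs_py : (List (String × List String)) × List String × String :=
  ([("a", ["b", "c"]), ("b", ["c"]), ("c", [])], ["r"], "a")

def Spec_bfs_py (adj_list : List (String × List String)) (result : List String) (emp : String) (out : List String) : Prop := out = bfs_py_alt adj_list result emp
instance (adj_list : List (String × List String)) (result : List String) (emp : String) (out : List String) : Decidable (Spec_bfs_py adj_list result emp out) := by unfold Spec_bfs_py; infer_instance

-- ===== CLAIM (what is proved, stated in full; the proofs are below) =====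
def Claim_equal_bfs_py : Prop := ∀ (adj_list : List (String × List String)) (result : List String) (emp : String), Dom_bfs_py adj_list result emp → Pre_bfs_py adj_list result emp → Spec_bfs_py adj_list result emp (bfs_py adj_list result emp)

-- ===== LEMMAS AND PROOFS =====

-- A's queue is always "rest of the current level ++ already-collected next level"; what it still
-- emits is the truncated rest of the level followed by the flattened later levels.
theorem pvLevels_nil (adj_list : List (String × List String)) (n : Nat) :
    pvLevels adj_list n [] = [] := by
  cases n <;> simp [pvLevels]

theorem pvLevels_zero (adj_list : List (String × List String)) (f : List String) :
    pvLevels adj_list 0 f = [] := by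
  cases f <;> simp [pvLevels]

theorem pvLevels_cons (adj_list : List (String × List String)) (n : Nat) (x : String)
    (f : List String) :
    pvLevels adj_list (n + 1) (x :: f) =
      (x :: f).take (n + 1) ::
        pvLevels adj_list (n + 1 - (x :: f).length) ((x :: f).flatMap (pvCh adj_list)) := by
  simp [pvLevels]

-- A's queue is always "rest of the current level ++ already-collected next level"; what it still
-- emits is the truncated rest of the level followed by the flattened later levels.
theorem pvQrun_eq_levels (adj_list : List (String × List String)) :
    ∀ (n : Nat) (f p res : List String),
      pvQrun adj_list n (f ++ p) res =
        res ++ f.take n ++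
          (pvLevels adj_list (n - f.length) (p ++ f.flatMap (pvCh adj_list))).flatten := by
  intro n
  induction n using Nat.strong_induction_on with
  | _ n ih =>
    intro f p res
    match f, n with
    | x :: f', 0 =>
      simp [pvQrun, pvLevels_zero]
    | x :: f', m + 1 =>
      have step : pvQrun adj_list (m + 1) ((x :: f') ++ p) res
          = pvQrun adj_list m (f' ++ (p ++ pvCh adj_list x)) (res ++ [x]) := by
        simp [pvQrun]
      rw [step, ih m (Nat.lt_succ_self m)]
      simp [List.flatMap_cons, Nat.succ_sub_succ]
    | [], 0 =>
      cases p <;> simp [pvQrun, pvLevels_zero, pvLevels_nil]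
    | [], m + 1 =>
      cases p with
      | nil => simp [pvQrun, pvLevels_nil]
      | cons y p' =>
        have step : pvQrun adj_list (m + 1) (y :: p') res
            = pvQrun adj_list m (p' ++ pvCh adj_list y) (res ++ [y]) := by
          simp [pvQrun]
        rw [show ([] : List String) ++ y :: p' = y :: p' by rfl, step,
          ih m (Nat.lt_succ_self m)]
        simp [pvLevels_cons, List.flatMap_cons, Nat.succ_sub_succ]

-- ===== VERDICT (by name: the statement is the Claim_ definition above) =====
theorem bfs_py_spec : Claim_equal_bfs_py := by
  intro adj_list result emp _ _
  unfold Spec_bfs_py bfs_py bfs_py_alt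
  have h := pvQrun_eq_levels adj_list (pvFuel adj_list emp) [] (pvCh adj_list emp) result
  simpa using h
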